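-- pv_equiv track=rewrite | github.com/chirbard/leetcode-codewars-hackerrank-solutions-python | codewars/Battleship field validator/main.py | check_placement
-- ===== SOURCE A (Python) =====
-- def check_diagonals(cell):
--     if cell[0][0] == 1 and cell[1][1] == 1:
--         return False
--     if cell[1][0] == 1 and cell[0][1] == 1:
--         return False
--     return True
--
-- def check_placement(field, height, width):
--     for y in range(height - 1):
--         for x in range(width - 1):
--             cell = [
--                 [field[y][x], field[y][x + 1]],
--                 [field[y + 1][x], field[y + 1][x + 1]],
--             ]
--             if not check_diagonals(cell):
--                 return False
--     return True
-- ===== SOURCE B (Python) =====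
-- def check_placement(field, height, width):
--     # No two cells can touch diagonally unless the grid is at least 2x2.
--     if height < 2 or width < 2:
--         return True
--     ones = {(y, x)
--             for y, row in enumerate(field[:height])
--             for x, v in enumerate(row[:width]) if v == 1}
--     return not any((y + 1, x + 1) in ones or (y + 1, x - 1) in ones
--                    for (y, x) in ones)
-- ===== Notes on version B (the rewrite author's own statement) =====
-- stated objective: alternative
-- what changed: A scans every 2x2 block and tests its two diagonals; B builds the set of ship-cell coordinates with one comprehension and returns False iff some ship cell has a ship on a lower-diagonal neighbour, via set membership.
-- outside the precondition, e.g. on check_placement([[1, 1], [1, 1]], 3, 2): A returns False, B returns False; on check_placement([[1, 0], [0, 0]], 3, 2): A raises IndexError, B returns True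
import Mathlib
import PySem

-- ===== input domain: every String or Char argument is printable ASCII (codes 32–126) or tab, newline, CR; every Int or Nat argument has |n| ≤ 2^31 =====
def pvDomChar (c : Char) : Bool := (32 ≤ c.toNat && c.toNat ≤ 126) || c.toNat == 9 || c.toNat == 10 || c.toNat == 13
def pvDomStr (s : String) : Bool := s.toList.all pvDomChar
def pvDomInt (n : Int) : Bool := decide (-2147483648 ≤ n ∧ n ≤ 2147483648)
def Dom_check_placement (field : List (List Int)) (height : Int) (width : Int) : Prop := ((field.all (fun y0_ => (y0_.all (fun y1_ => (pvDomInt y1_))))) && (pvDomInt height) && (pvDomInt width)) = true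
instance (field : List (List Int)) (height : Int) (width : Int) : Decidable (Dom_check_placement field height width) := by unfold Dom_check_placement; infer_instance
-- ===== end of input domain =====

-- B replaces A's fixed 2x2-block scan by one set comprehension of ship coordinates plus a
-- membership test of each ship cell's two lower diagonal neighbours (objective: alternative).

-- B replaces A's fixed 2x2-block scan by a set comprehension of ship coordinates plus a
-- membership test of each ship cell's two lower diagonal neighbours (objective: alternative).

-- ===== PORT A =====
-- field[y][x]; pyGetD's default 0 / [] is only reached where Python raises IndexError,
-- which Pre_check_placement excludes.
def fgetA (field : List (List Int)) (y x : Int) : Int :=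
  PySem.List.pyGetD (PySem.List.pyGetD field y []) x 0

def check_diagonals (cell : List (List Int)) : Bool :=
  if fgetA cell 0 0 == 1 && fgetA cell 1 1 == 1 then false
  else if fgetA cell 1 0 == 1 && fgetA cell 0 1 == 1 then false
  else true

def check_placement (field : List (List Int)) (height : Int) (width : Int) : Bool :=
  (PySem.List.pyRange 0 (height - 1) 1).all fun y =>
    (PySem.List.pyRange 0 (width - 1) 1).all fun x =>
      check_diagonals
        [[fgetA field y x, fgetA field y (x + 1)],
         [fgetA field (y + 1) x, fgetA field (y + 1) (x + 1)]]

-- ===== PORT B =====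
-- the coordinate list behind Source B's set comprehension (insertion order)
def onesList (field : List (List Int)) (height : Int) (width : Int) : List (Int × Int) :=
  (PySem.List.enumerate (PySem.List.slice field none (some height)) 0).flatMap fun yr =>
    (PySem.List.enumerate (PySem.List.slice yr.2 none (some width)) 0).flatMap fun xv =>
      if xv.2 = 1 then [(yr.1, xv.1)] else []

def check_placement_alt (field : List (List Int)) (height : Int) (width : Int) : Bool :=
  if height < 2 || width < 2 then true
  else
    let ones : PySem.Set (Int × Int) := PySem.Set.ofList (onesList field height width)
    !(ones.any fun p =>
        PySem.Set.contains ones (p.1 + 1, p.2 + 1) || PySem.Set.contains ones (p.1 + 1, p.2 - 1))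

-- ===== PRECONDITION & SPEC =====
-- Pre_ excludes mismatched dimensions (height, width ≥ 2 but exceeding the actual grid):
-- there A raises IndexError, except when it happens to find a conflict before the
-- out-of-range access and returns False (B returns False on those too).
def Pre_check_placement (field : List (List Int)) (height : Int) (width : Int) : Prop :=
  height < 2 ∨ width < 2 ∨
    (height ≤ (field.length : Int) ∧ ∀ row ∈ field.take height.toNat, width ≤ (row.length : Int))
instance (field : List (List Int)) (height : Int) (width : Int) : Decidable (Pre_check_placement field height width) := by unfold Pre_check_placement; infer_instance

def pvWitness_check_placement : List (List Int) × Int × Int := ([[1, 0], [0, 1]], 2, 2)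

def Spec_check_placement (field : List (List Int)) (height : Int) (width : Int) (out : Bool) : Prop := out = check_placement_alt field height width
instance (field : List (List Int)) (height : Int) (width : Int) (out : Bool) : Decidable (Spec_check_placement field height width out) := by unfold Spec_check_placement; infer_instance

-- ===== CLAIM (what is proved, stated in full; the proofs are below) =====
def Claim_equal_check_placement : Prop := ∀ (field : List (List Int)) (height : Int) (width : Int), Dom_check_placement field height width → Pre_check_placement field height width → Spec_check_placement field height width (check_placement field height width)

-- ===== LEMMAS AND PROOFS =====
def gf (field : List (List Int)) (a b : Nat) : Int := (field.getD a []).getD b 0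

theorem fgetA_natCast (f : List (List Int)) (a b : Nat) : fgetA f (a : Int) (b : Int) = gf f a b := by
  simp [fgetA, gf, PySem.List.pyGetD_natCast]

theorem cd_lit (a b c d : Int) :
    check_diagonals [[a, b], [c, d]] = true ↔ ¬(a = 1 ∧ d = 1) ∧ ¬(c = 1 ∧ b = 1) := by
  have h00 : fgetA [[a, b], [c, d]] 0 0 = a := rfl
  have h01 : fgetA [[a, b], [c, d]] 0 1 = b := rfl
  have h10 : fgetA [[a, b], [c, d]] 1 0 = c := rfl
  have h11 : fgetA [[a, b], [c, d]] 1 1 = d := rfl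
  simp only [check_diagonals, h00, h01, h10, h11]
  split_ifs with h1 h2 <;> simp_all

theorem A_iff (f : List (List Int)) (h w : Int) :
    check_placement f h w = true ↔
      ∀ a b : Nat, (a : Int) + 1 < h → (b : Int) + 1 < w →
        ¬(gf f a b = 1 ∧ gf f (a + 1) (b + 1) = 1) ∧
        ¬(gf f (a + 1) b = 1 ∧ gf f a (b + 1) = 1) := by
  simp only [check_placement, List.all_eq_true, PySem.List.mem_pyRange_one, cd_lit]
  constructor
  · intro H a b ha hb
    have := H (a : Int) ⟨by positivity, by omega⟩ (b : Int) ⟨by positivity, by omega⟩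
    rw [fgetA_natCast,
        show ((a : Int) + 1) = ((a + 1 : Nat) : Int) by push_cast; ring,
        show ((b : Int) + 1) = ((b + 1 : Nat) : Int) by push_cast; ring,
        fgetA_natCast, fgetA_natCast, fgetA_natCast] at this
    exact this
  · intro H y hy x hx
    obtain ⟨hy0, hy1⟩ := hy
    obtain ⟨hx0, hx1⟩ := hx
    have hya : y = (y.toNat : Int) := (Int.toNat_of_nonneg hy0).symm
    have hxa : x = (x.toNat : Int) := (Int.toNat_of_nonneg hx0).symm
    rw [hya, hxa,
        show ((y.toNat : Int) + 1) = ((y.toNat + 1 : Nat) : Int) by push_cast; ring,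
        show ((x.toNat : Int) + 1) = ((x.toNat + 1 : Nat) : Int) by push_cast; ring,
        fgetA_natCast, fgetA_natCast, fgetA_natCast, fgetA_natCast]
    exact H y.toNat x.toNat (by omega) (by omega)

theorem mem_enumerate_zero {α : Type} (xs : List α) (q : Int × α) :
    q ∈ PySem.List.enumerate xs 0 ↔ ∃ k : Nat, xs[k]? = some q.2 ∧ q.1 = (k : Int) := by
  rw [List.mem_iff_getElem?]
  constructor
  · rintro ⟨k, hk⟩
    rw [PySem.List.getElem?_enumerate] at hk
    cases h : xs[k]? with
    | none => rw [h] at hk; simp at hk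
    | some v =>
      rw [h] at hk
      simp only [Option.map_some, Option.some.injEq] at hk
      refine ⟨k, ?_, ?_⟩ <;> rw [← hk] <;> simp [h]
  · rintro ⟨k, hk, h1⟩
    refine ⟨k, ?_⟩
    rw [PySem.List.getElem?_enumerate, hk]
    simp only [Option.map_some, Option.some.injEq]
    cases q; simp_all

theorem mem_onesList (f : List (List Int)) (h w : Int) (hh : 0 ≤ h) (hw : 0 ≤ w)
    (p : Int × Int) :
    p ∈ onesList f h w ↔
      ∃ a b : Nat, a < h.toNat ∧ a < f.length ∧ b < w.toNat ∧ b < (f.getD a []).length ∧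
        p = ((a : Int), (b : Int)) ∧ gf f a b = 1 := by
  simp only [onesList, PySem.List.slice_to f hh, List.mem_flatMap, mem_enumerate_zero]
  constructor
  · rintro ⟨yr, ⟨a, hrow, hy⟩, xv, ⟨b, hval, hx⟩, hp⟩
    rw [PySem.List.slice_to yr.2 hw] at hval
    have halen : a < h.toNat ⊓ f.length := by
      have := (List.getElem?_eq_some_iff.mp hrow).1
      simpa using this
    have ha1 : a < h.toNat := by omega
    have ha2 : a < f.length := by omega
    have hrow' : yr.2 = f[a] := by
      rw [List.getElem?_take_of_lt ha1] at hrow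
      obtain ⟨_, hv⟩ := List.getElem?_eq_some_iff.mp hrow
      exact hv.symm
    split_ifs at hp with hone
    · simp only [List.mem_singleton] at hp
      have hblen : b < w.toNat ⊓ yr.2.length := by
        have := (List.getElem?_eq_some_iff.mp hval).1
        simpa using this
      have hb1 : b < w.toNat := by omega
      have hb2 : b < yr.2.length := by omega
      have hval' : yr.2[b] = xv.2 := by
        rw [List.getElem?_take_of_lt hb1] at hval
        exact (List.getElem?_eq_some_iff.mp hval).2
      have hgd : f.getD a [] = f[a] := List.getD_eq_getElem f [] ha2
      refine ⟨a, b, ha1, ha2, hb1, by rw [hgd]; rw [hrow'] at hb2; exact hb2, ?_, ?_⟩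
      · rw [hp, hy, hx]
      · rw [gf, hgd, ← hrow', List.getD_eq_getElem yr.2 0 hb2, hval', hone]
    · simp at hp
  · rintro ⟨a, b, ha1, ha2, hb1, hb2, hp, hg⟩
    have hgd : f.getD a [] = f[a] := List.getD_eq_getElem f [] ha2
    rw [hgd] at hb2
    refine ⟨((a : Int), f[a]), ⟨a, ?_, rfl⟩, ((b : Int), f[a][b]), ⟨b, ?_, rfl⟩, ?_⟩
    · rw [List.getElem?_take_of_lt ha1]
      exact List.getElem?_eq_some_iff.mpr ⟨ha2, rfl⟩
    · rw [PySem.List.slice_to _ hw, List.getElem?_take_of_lt hb1]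
      exact List.getElem?_eq_some_iff.mpr ⟨hb2, rfl⟩
    · have : f[a][b] = 1 := by rw [gf, hgd, List.getD_eq_getElem f[a] 0 hb2] at hg; exact hg
      rw [if_pos this]
      simp [hp]

theorem B_iff (f : List (List Int)) (h w : Int) (hh2 : 2 ≤ h) (hw2 : 2 ≤ w)
    (hlen : h ≤ (f.length : Int))
    (hrowlen : ∀ row ∈ f.take h.toNat, w ≤ (row.length : Int)) :
    check_placement_alt f h w = true ↔
      ¬ ∃ a b : Nat, (a < h.toNat ∧ b < w.toNat ∧ gf f a b = 1) ∧
        ((a + 1 < h.toNat ∧ b + 1 < w.toNat ∧ gf f (a + 1) (b + 1) = 1) ∨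
         (a + 1 < h.toNat ∧ 1 ≤ b ∧ gf f (a + 1) (b - 1) = 1)) := by
  have hmem : ∀ p : Int × Int, p ∈ onesList f h w ↔
      ∃ a b : Nat, a < h.toNat ∧ b < w.toNat ∧ p = ((a : Int), (b : Int)) ∧ gf f a b = 1 := by
    intro p
    rw [mem_onesList f h w (by omega) (by omega)]
    constructor
    · rintro ⟨a, b, c1, c2, c3, c4, c5, c6⟩; exact ⟨a, b, c1, c3, c5, c6⟩
    · rintro ⟨a, b, c1, c3, c5, c6⟩
      have ha2 : a < f.length := by omega
      have hrow : f[a] ∈ f.take h.toNat := by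
        have : (f.take h.toNat)[a]'(by simp; omega) ∈ f.take h.toNat := List.getElem_mem _
        rwa [List.getElem_take] at this
      have := hrowlen f[a] hrow
      exact ⟨a, b, c1, ha2, c3, by rw [List.getD_eq_getElem f [] ha2]; omega, c5, c6⟩
  unfold check_placement_alt
  rw [if_neg (by simp; omega)]
  show (!((PySem.Set.ofList (onesList f h w)).any fun p =>
      PySem.Set.contains (PySem.Set.ofList (onesList f h w)) (p.1 + 1, p.2 + 1) ||
      PySem.Set.contains (PySem.Set.ofList (onesList f h w)) (p.1 + 1, p.2 - 1))) = true ↔ _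
  simp only [Bool.not_eq_eq_eq_not, Bool.not_true, ← Bool.not_eq_true]
  apply not_congr
  rw [List.any_eq_true]
  constructor
  · rintro ⟨p, hpL, hpred⟩
    rw [PySem.Set.mem_ofList, hmem] at hpL
    obtain ⟨a, b, ha, hb, rfl, hg⟩ := hpL
    rw [Bool.or_eq_true, PySem.Set.contains_iff, PySem.Set.contains_iff,
        PySem.Set.mem_ofList, PySem.Set.mem_ofList, hmem, hmem] at hpred
    rcases hpred with ⟨a', b', ha', hb', heq, hg'⟩ | ⟨a', b', ha', hb', heq, hg'⟩
    · simp only [Prod.mk.injEq] at heq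
      have e1 : a' = a + 1 := by omega
      have e2 : b' = b + 1 := by omega
      exact ⟨a, b, ⟨ha, hb, hg⟩, Or.inl ⟨by omega, by omega, by rw [← e1, ← e2]; exact hg'⟩⟩
    · simp only [Prod.mk.injEq] at heq
      have hb1 : 1 ≤ b := by omega
      have e1 : a' = a + 1 := by omega
      have e2 : b' = b - 1 := by omega
      exact ⟨a, b, ⟨ha, hb, hg⟩, Or.inr ⟨by omega, hb1, by rw [← e1, ← e2]; exact hg'⟩⟩
  · rintro ⟨a, b, ⟨ha, hb, hg⟩, hcase⟩
    refine ⟨((a : Int), (b : Int)), by rw [PySem.Set.mem_ofList, hmem]; exact ⟨a, b, ha, hb, rfl, hg⟩, ?_⟩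
    rw [Bool.or_eq_true, PySem.Set.contains_iff, PySem.Set.contains_iff,
        PySem.Set.mem_ofList, PySem.Set.mem_ofList, hmem, hmem]
    rcases hcase with ⟨ha1, hb1, hg1⟩ | ⟨ha1, hb1, hg1⟩
    · exact Or.inl ⟨a + 1, b + 1, ha1, hb1, by push_cast; ring_nf, hg1⟩
    · exact Or.inr ⟨a + 1, b - 1, ha1, by omega, by push_cast [hb1]; rfl, hg1⟩

-- ===== VERDICT (by name: the statement is the Claim_ definition above) =====
theorem check_placement_spec : Claim_equal_check_placement := by
  intro f h w _ hPre
  unfold Spec_check_placement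
  by_cases h2 : h < 2
  · rw [(A_iff f h w).mpr (fun a b ha hb => absurd ha (by omega)),
      check_placement_alt, if_pos (by simp; omega)]
  · by_cases w2 : w < 2
    · rw [(A_iff f h w).mpr (fun a b ha hb => absurd hb (by omega)),
        check_placement_alt, if_pos (by simp; omega)]
    · rcases hPre with hc | hc | ⟨hlen, hrowlen⟩
      · omega
      · omega
      rw [Bool.eq_iff_iff, A_iff, B_iff f h w (by omega) (by omega) hlen hrowlen]
      constructor
      · rintro H ⟨a, b, ⟨ha, hb, hg⟩, hcase⟩
        rcases hcase with ⟨ha1, hb1, hg1⟩ | ⟨ha1, hb1, hg1⟩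
        · exact (H a b (by omega) (by omega)).1 ⟨hg, hg1⟩
        · refine (H a (b - 1) (by omega) (by omega)).2 ⟨hg1, ?_⟩
          rw [Nat.sub_add_cancel hb1]; exact hg
      · intro N a b ha hb
        constructor
        · rintro ⟨g1, g2⟩
          exact N ⟨a, b, ⟨by omega, by omega, g1⟩, Or.inl ⟨by omega, by omega, g2⟩⟩
        · rintro ⟨g1, g2⟩
          refine N ⟨a, b + 1, ⟨by omega, by omega, g2⟩, Or.inr ⟨by omega, by omega, ?_⟩⟩
          simpa using g1
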